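-- pv_equiv track=rewrite | github.com/Zaanis/DSC20 | hw06.py | candy_num
-- ===== SOURCE A (Python) =====
-- def candy_num(bag, fav):
--     """
--     ##############################################################
--     use recursion that takes a list of candies you have and a list
--     of candies you like, count and return number of your favorite
--     candies
--     ##############################################################
--
--     >>> bag = ["Skittles", "M&M", "Hershey","Snickers", "Skittles"]
--     >>> candy_num(bag, ["Skittles"])
--     2
--     >>> candy_num(bag, [])
--     0
--     >>> candy_num(bag, ["Skittles", "Hershey"])
--     3
--
--     # Add AT LEAST 3 doctests below, DO NOT delete this line
--     >>> candy_num(bag, ['Hershey'])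
--     1
--     >>> candy_num(bag, ['bananas', 'Snickers'])
--     1
--     >>> candy_num(['a', 'b', 'c', 'd', 'a' ,'a', 'a', 'a', 'a'], ['a', 'b'])
--     7
--     """
--     # Your code starts here
--     if len(bag) == 0:
--         return 0
--     else:
--         if fav.count(bag[0]) > 0:
--             return 1 + candy_num(bag[1:], fav)
--         else:
--             return 0 + candy_num(bag[1:], fav)
-- ===== SOURCE B (Python) =====
-- def candy_num(bag, fav):
--     count = 0
--     for item in bag:
--         if item in fav:
--             count += 1
--     return count
-- ===== Notes on version B (the rewrite author's own statement) =====
-- stated objective: simpler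
-- what changed: Replaces the head/tail recursion with fav.count per element by an iterative accumulator loop using a direct membership test.
import Mathlib
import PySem

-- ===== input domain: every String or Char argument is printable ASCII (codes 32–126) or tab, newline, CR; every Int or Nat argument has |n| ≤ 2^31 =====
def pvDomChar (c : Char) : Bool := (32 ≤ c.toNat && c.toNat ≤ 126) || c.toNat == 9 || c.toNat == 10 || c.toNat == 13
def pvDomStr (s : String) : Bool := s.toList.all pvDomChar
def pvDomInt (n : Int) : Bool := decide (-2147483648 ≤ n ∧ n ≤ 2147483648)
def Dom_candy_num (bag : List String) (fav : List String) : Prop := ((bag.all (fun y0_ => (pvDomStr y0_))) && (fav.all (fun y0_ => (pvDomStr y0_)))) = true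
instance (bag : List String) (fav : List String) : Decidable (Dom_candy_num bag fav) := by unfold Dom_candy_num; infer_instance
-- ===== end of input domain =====

-- ===== PORT A =====
-- B replaces A's recursion (fav.count at each step) by an iterative accumulator loop; objective: simpler.
def candy_num (bag : List String) (fav : List String) : Int :=
  match bag with
  | [] => 0
  | x :: rest =>
    if (PySem.List.count fav x : Int) > 0 then 1 + candy_num rest fav
    else 0 + candy_num rest fav

-- ===== PORT B =====
def candy_num_alt (bag : List String) (fav : List String) : Int :=
  bag.foldl (fun count item => if item ∈ fav then count + 1 else count) 0

-- ===== PRECONDITION & SPEC =====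
def Spec_candy_num (bag : List String) (fav : List String) (out : Int) : Prop := out = candy_num_alt bag fav
instance (bag : List String) (fav : List String) (out : Int) : Decidable (Spec_candy_num bag fav out) := by unfold Spec_candy_num; infer_instance

-- ===== CLAIM (what is proved, stated in full; the proofs are below) =====
def Claim_equal_candy_num : Prop := ∀ (bag : List String) (fav : List String), Dom_candy_num bag fav → Spec_candy_num bag fav (candy_num bag fav)

-- ===== LEMMAS AND PROOFS =====
theorem candy_num_foldl_acc (bag fav : List String) (c : Int) :
    bag.foldl (fun count item => if item ∈ fav then count + 1 else count) c
      = c + candy_num bag fav := by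
  induction bag generalizing c with
  | nil => simp [candy_num]
  | cons x rest ih =>
    simp only [List.foldl_cons, candy_num, ih]
    by_cases h : x ∈ fav
    · rw [if_pos h, if_pos]
      · ring
      · have := (List.count_pos_iff).2 h
        simp [PySem.List.count_eq]
        omega
    · rw [if_neg h, if_neg]
      · ring
      · have : fav.count x = 0 := List.count_eq_zero.2 h
        simp [PySem.List.count_eq, this]

-- ===== VERDICT (by name: the statement is the Claim_ definition above) =====
theorem candy_num_spec : Claim_equal_candy_num := by
  intro bag fav _
  unfold Spec_candy_num candy_num_alt
  rw [candy_num_foldl_acc]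
  ring
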